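-- pv_equiv track=rewrite | github.com/Rubal0990/GFG-DSA | Make the array beautiful - GFG/make-the-array-beautiful.py | makeBeautiful
-- ===== SOURCE A (Python) =====
-- from typing import List
--
-- def makeBeautiful(arr: List[int]) -> List[int]:
--     size = len(arr)
--     stack = []
--
--     for i in range(size):
--         if stack:
--             if (stack[-1]>=0 and arr[i]<0) or (stack[-1]<0 and arr[i]>=0):
--                 stack.pop()
--             else:
--                 stack.append(arr[i])
--         else:
--             stack.append(arr[i])
--
--     return stack
-- ===== SOURCE B (Python) =====
-- from typing import List
--
-- def makeBeautiful(arr: List[int]) -> List[int]: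
--     # Repeatedly delete the leftmost adjacent opposite-sign pair until none remains.
--     res = list(arr)
--     while True:
--         for i in range(len(res) - 1):
--             a, b = res[i], res[i + 1]
--             if (a >= 0 and b < 0) or (a < 0 and b >= 0):
--                 del res[i:i + 2]
--                 break
--         else:
--             return res
-- ===== Notes on version B (the rewrite author's own statement) =====
-- stated objective: alternative
-- what changed: Replaces the single-pass stack with repeated left-to-right rescans that delete the leftmost adjacent opposite-sign pair until no such pair remains; confluence of this cancellation gives the same unique normal form.
import Mathlib
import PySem

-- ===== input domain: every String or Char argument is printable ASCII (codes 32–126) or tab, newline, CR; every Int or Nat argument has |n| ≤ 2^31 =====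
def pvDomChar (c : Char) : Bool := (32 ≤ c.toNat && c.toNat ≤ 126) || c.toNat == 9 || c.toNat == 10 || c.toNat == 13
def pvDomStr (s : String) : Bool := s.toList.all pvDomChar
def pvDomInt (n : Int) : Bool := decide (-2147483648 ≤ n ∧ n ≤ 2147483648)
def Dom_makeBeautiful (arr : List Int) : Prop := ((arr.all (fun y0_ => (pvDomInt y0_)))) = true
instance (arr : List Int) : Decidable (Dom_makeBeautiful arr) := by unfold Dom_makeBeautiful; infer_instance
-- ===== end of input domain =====

-- B replaces the one-pass stack with repeated rescans deleting the leftmost adjacent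
-- opposite-sign pair (an alternative decomposition, not faster).

-- ===== PORT A =====
-- stack is the Python list: top of stack = last element (append / [-1] / pop)
def makeBeautiful (arr : List Int) : List Int :=
  arr.foldl (fun stack x =>
    if stack ≠ [] then
      if (stack.getLast! ≥ 0 ∧ x < 0) ∨ (stack.getLast! < 0 ∧ x ≥ 0) then
        stack.dropLast
      else
        stack ++ [x]
    else
      stack ++ [x]) []

-- ===== PORT B =====
-- the opposite-sign test of Source B
def pvBad (a b : Int) : Bool := decide ((a ≥ 0 ∧ b < 0) ∨ (a < 0 ∧ b ≥ 0))

-- the inner `for` scan of Source B: first adjacent bad pair deleted, or none if a full pass finds none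
def pvScan : List Int → Option (List Int)
  | a :: b :: t => if pvBad a b then some t else (pvScan (b :: t)).map (a :: ·)
  | _ => none

theorem pvScan_length {l l' : List Int} (h : pvScan l = some l') : l'.length < l.length := by
  match l with
  | [] => simp [pvScan] at h
  | [a] => simp [pvScan] at h
  | a :: b :: t =>
    by_cases hb : pvBad a b
    · simp [pvScan, hb] at h; subst h; simp
    · simp [pvScan, hb, Option.map_eq_some_iff] at h
      obtain ⟨l'', h1, h2⟩ := h
      have := pvScan_length h1
      subst h2; simp at this ⊢; omega

-- the `while True` loop of Source B
def pvNorm (l : List Int) : List Int :=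
  match h : pvScan l with
  | some l' => pvNorm l'
  | none => l
termination_by l.length
decreasing_by exact pvScan_length h

def makeBeautiful_alt (arr : List Int) : List Int := pvNorm arr

-- ===== PRECONDITION & SPEC =====
def Spec_makeBeautiful (arr : List Int) (out : List Int) : Prop := out = makeBeautiful_alt arr
instance (arr : List Int) (out : List Int) : Decidable (Spec_makeBeautiful arr out) := by unfold Spec_makeBeautiful; infer_instance

-- ===== CLAIM (what is proved, stated in full; the proofs are below) =====
def Claim_equal_makeBeautiful : Prop := ∀ (arr : List Int), Dom_makeBeautiful arr → Spec_makeBeautiful arr (makeBeautiful arr)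

-- ===== LEMMAS AND PROOFS =====

theorem pvGetLast!_cons_cons (a b : Int) (s : List Int) :
    (a :: b :: s).getLast! = (b :: s).getLast! := by
  simp [List.getLast?_cons_cons]

theorem pvNorm_none {l : List Int} (h : pvScan l = none) : pvNorm l = l := by
  rw [pvNorm]; split <;> simp_all

theorem pvNorm_some {l l' : List Int} (h : pvScan l = some l') : pvNorm l = pvNorm l' := by
  rw [pvNorm]; split <;> simp_all

-- appending x after a clean stack whose last element does not clash keeps it clean
theorem pvScan_push : ∀ (s : List Int) (x : Int), pvScan s = none →
    (s = [] ∨ pvBad s.getLast! x = false) → pvScan (s ++ [x]) = none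
  | [], _, _, _ => rfl
  | [a], x, _, hl => by
    rcases hl with hl | hl
    · simp at hl
    · simp [List.getLast!] at hl
      simp [pvScan, hl]
  | a :: b :: s', x, h, hl => by
    rcases hl with hl | hl
    · simp at hl
    · simp [pvScan] at h
      by_cases hb : pvBad a b
      · simp [hb] at h
      · simp [hb, Option.map_eq_none_iff] at h
        have hl' : pvBad (b :: s').getLast! x = false := by
          simpa [pvGetLast!_cons_cons] using hl
        have := pvScan_push (b :: s') x h (Or.inr hl')
        simp [pvScan, hb, Option.map_eq_none_iff]
        simpa using this

-- dropping the last element of a clean stack keeps it clean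
theorem pvScan_dropLast : ∀ (s : List Int), pvScan s = none → pvScan s.dropLast = none
  | [], _ => rfl
  | [_], _ => rfl
  | [_, _], _ => rfl
  | a :: b :: c :: s', h => by
    simp [pvScan] at h
    by_cases hb : pvBad a b
    · simp [hb] at h
    · simp [hb, Option.map_eq_none_iff] at h
      have := pvScan_dropLast (b :: c :: s') h
      simp [List.dropLast] at this ⊢
      simp [pvScan, hb, Option.map_eq_none_iff]
      exact this

-- on a clean stack followed by a clashing x, the scan deletes exactly (last s, x)
theorem pvScan_clash : ∀ (s : List Int) (x : Int) (t : List Int), pvScan s = none →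
    s ≠ [] → pvBad s.getLast! x = true → pvScan (s ++ x :: t) = some (s.dropLast ++ t)
  | [], _, _, _, hne, _ => absurd rfl hne
  | [a], x, t, _, _, hb => by
    simp [List.getLast!] at hb
    simp [pvScan, hb]
  | a :: b :: s', x, t, h, _, hb => by
    simp [pvScan] at h
    by_cases hab : pvBad a b
    · simp [hab] at h
    · simp [hab, Option.map_eq_none_iff] at h
      have hb' : pvBad (b :: s').getLast! x = true := by
        simpa [pvGetLast!_cons_cons] using hb
      have := pvScan_clash (b :: s') x t h (by simp) hb'
      have e : (b :: s') ++ x :: t = b :: (s' ++ x :: t) := rfl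
      rw [e] at this
      show pvScan (a :: b :: (s' ++ x :: t)) = some ((a :: (b :: s').dropLast) ++ t)
      simp only [pvScan]
      rw [if_neg hab, this]
      rfl

-- main invariant: from any clean stack s, A's loop over rest computes the normal form of s ++ rest
theorem foldA_eq : ∀ (rest s : List Int), pvScan s = none →
    rest.foldl (fun stack x =>
      if stack ≠ [] then
        if (stack.getLast! ≥ 0 ∧ x < 0) ∨ (stack.getLast! < 0 ∧ x ≥ 0) then
          stack.dropLast
        else
          stack ++ [x]
      else
        stack ++ [x]) s = pvNorm (s ++ rest)
  | [], s, h => by simpa using (pvNorm_none h).symm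
  | x :: t, s, h => by
    rw [List.foldl_cons]
    by_cases hs : s = []
    · subst hs
      simp only [ne_eq, not_true_eq_false, if_false, List.nil_append]
      exact foldA_eq t [x] rfl
    · by_cases hb : (s.getLast! ≥ 0 ∧ x < 0) ∨ (s.getLast! < 0 ∧ x ≥ 0)
      · have hbad : pvBad s.getLast! x = true := decide_eq_true hb
        simp only [ne_eq, hs, not_false_eq_true, if_true, hb, reduceIte]
        rw [foldA_eq t s.dropLast (pvScan_dropLast s h)]
        rw [pvNorm_some (pvScan_clash s x t h hs hbad)]
      · have hbad : pvBad s.getLast! x = false := decide_eq_false hb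
        simp only [ne_eq, hs, not_false_eq_true, if_true, hb, reduceIte]
        rw [foldA_eq t (s ++ [x]) (pvScan_push s x h (Or.inr hbad))]
        simp

-- ===== VERDICT (by name: the statement is the Claim_ definition above) =====
theorem makeBeautiful_spec : Claim_equal_makeBeautiful := by
  intro arr _
  unfold Spec_makeBeautiful makeBeautiful makeBeautiful_alt
  simpa using foldA_eq arr [] rfl
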